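-- pv_equiv track=rewrite | github.com/Kabir0067/Python-Beginer | 16.1.Repeat/task3.py | corona
-- ===== SOURCE A (Python) =====
-- def corona(num1,num2,num3):
--     cnt=0
--     for i in range(1,num1+1):
--         res=num1-num2
--         num3-=res
--         cnt+=1
--         if num3<=0:
--             break
--     return cnt
-- ===== SOURCE B (Python) =====
-- def corona(num1, num2, num3):
--     # Closed-form O(1) re-implementation of A's capped subtraction loop.
--     if num1 <= 0:
--         return 0
--     res = num1 - num2
--     if res > 0:
--         k = max(1, -((-num3) // res))  # ceil(num3/res), at least one iteration always runs
--         return min(num1, k)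
--     # res <= 0: num3 never decreases; the loop breaks at the first step
--     # only if num3 <= res, otherwise it runs all num1 iterations.
--     return 1 if num3 <= res else num1
-- ===== Notes on version B (the rewrite author's own statement) =====
-- stated objective: faster
-- what changed: Replaced the O(num1) subtraction loop with a closed-form ceiling-division formula min(num1, max(1, ceil(num3/res))), with direct case analysis for res <= 0.
import Mathlib
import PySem

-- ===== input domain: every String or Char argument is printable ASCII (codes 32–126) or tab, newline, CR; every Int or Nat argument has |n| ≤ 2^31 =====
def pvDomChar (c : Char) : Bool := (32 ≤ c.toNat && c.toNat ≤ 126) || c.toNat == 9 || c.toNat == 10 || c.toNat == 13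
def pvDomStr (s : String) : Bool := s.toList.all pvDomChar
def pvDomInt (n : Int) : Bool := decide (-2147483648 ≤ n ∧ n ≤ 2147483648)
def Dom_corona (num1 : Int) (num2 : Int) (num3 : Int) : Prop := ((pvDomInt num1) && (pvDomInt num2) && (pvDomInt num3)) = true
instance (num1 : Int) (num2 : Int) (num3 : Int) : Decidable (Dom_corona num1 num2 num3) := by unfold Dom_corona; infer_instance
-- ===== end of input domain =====

-- B replaces A's O(num1) subtraction loop by a closed-form ceiling-division formula (faster, asymptotic).


-- ===== PORT A =====
-- the for-loop over range(1, num1+1) with early break: state (num3, cnt), one step per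
-- remaining range element (range is lazy in Python, so the loop counts, it does not build a list)
def coronaLoop (num1 : Int) (num2 : Int) : Nat → Int → Int → Int
  | 0, _, cnt => cnt
  | n + 1, num3, cnt =>
    let res := num1 - num2
    let num3' := num3 - res
    let cnt' := cnt + 1
    if num3' ≤ 0 then cnt' else coronaLoop num1 num2 n num3' cnt'

def corona (num1 : Int) (num2 : Int) (num3 : Int) : Int :=
  coronaLoop num1 num2 ((num1 + 1) - 1).toNat num3 0

-- ===== PORT B =====
def corona_alt (num1 : Int) (num2 : Int) (num3 : Int) : Int :=
  if num1 ≤ 0 then 0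
  else
    let res := num1 - num2
    if res > 0 then
      min num1 (max 1 (-(PySem.Int.floordiv (-num3) res)))
    else if num3 ≤ res then 1 else num1

-- ===== PRECONDITION & SPEC =====
def Spec_corona (num1 : Int) (num2 : Int) (num3 : Int) (out : Int) : Prop := out = corona_alt num1 num2 num3
instance (num1 : Int) (num2 : Int) (num3 : Int) (out : Int) : Decidable (Spec_corona num1 num2 num3 out) := by unfold Spec_corona; infer_instance

-- ===== CLAIM (what is proved, stated in full; the proofs are below) =====
def Claim_equal_corona : Prop := ∀ (num1 : Int) (num2 : Int) (num3 : Int), Dom_corona num1 num2 num3 → Spec_corona num1 num2 num3 (corona num1 num2 num3)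

-- ===== LEMMAS AND PROOFS =====

-- ceiling division by a positive divisor, bracketed
theorem ceil_brackets (a b : Int) (hb : 0 < b) :
    (-(PySem.Int.floordiv (-a) b) - 1) * b < a ∧ a ≤ -(PySem.Int.floordiv (-a) b) * b := by
  exact (PySem.Int.neg_floordiv_neg_eq_iff_of_pos hb).1 rfl

-- res > 0: the loop returns cnt + min n (max 1 ⌈num3/res⌉)
theorem coronaLoop_pos (num1 num2 : Int) (hres : 0 < num1 - num2) :
    ∀ (n : Nat) (num3 cnt : Int),
      coronaLoop num1 num2 n num3 cnt
        = cnt + min (n : Int) (max 1 (-(PySem.Int.floordiv (-num3) (num1 - num2)))) := by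
  intro n
  induction n with
  | zero =>
    intro num3 cnt
    simp [coronaLoop]
  | succ m ih =>
    intro num3 cnt
    set res := num1 - num2 with hres_def
    set c := -(PySem.Int.floordiv (-num3) res) with hc
    obtain ⟨hlo, hhi⟩ := ceil_brackets num3 res hres
    rw [← hc] at hlo hhi
    by_cases hbrk : num3 - res ≤ 0
    · -- break at this step: c ≤ 1
      have hc1 : c ≤ 1 := by
        by_contra h
        push Not at h
        have h2 : 2 ≤ c := h
        have : res ≤ (c - 1) * res := by nlinarith
        omega
      simp only [coronaLoop]
      rw [if_pos (by omega : num3 - (num1 - num2) ≤ 0)]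
      have h1 : max 1 c = 1 := by omega
      have h2 : min ((m + 1 : Nat) : Int) 1 = 1 := by
        push_cast; omega
      rw [h1, h2]
    · -- continue: c ≥ 2 and ⌈(num3-res)/res⌉ = c - 1
      have hc2 : 2 ≤ c := by
        by_contra h
        push Not at h
        have hc1 : c ≤ 1 := by omega
        have : c * res ≤ 1 * res := by
          apply mul_le_mul_of_nonneg_right hc1 (le_of_lt hres)
        omega
      have hstep : -(PySem.Int.floordiv (-(num3 - res)) res) = c - 1 := by
        rw [PySem.Int.neg_floordiv_neg_eq_iff_of_pos hres]
        constructor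
        · nlinarith
        · nlinarith
      simp only [coronaLoop]
      rw [if_neg (by omega : ¬ num3 - (num1 - num2) ≤ 0), ih (num3 - res) (cnt + 1), hstep]
      have h1 : max 1 (c - 1) = c - 1 := by omega
      have h2 : max 1 c = c := by omega
      rw [h1, h2]
      omega

-- res ≤ 0: breaks at the first step iff num3 ≤ res, else runs all n iterations
theorem coronaLoop_nonpos (num1 num2 : Int) (hres : num1 - num2 ≤ 0) :
    ∀ (n : Nat) (num3 cnt : Int),
      coronaLoop num1 num2 n num3 cnt
        = if n = 0 then cnt
          else if num3 ≤ num1 - num2 then cnt + 1 else cnt + n := by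
  intro n
  induction n with
  | zero => intro num3 cnt; simp [coronaLoop]
  | succ m ih =>
    intro num3 cnt
    by_cases hbrk : num3 - (num1 - num2) ≤ 0
    · simp only [coronaLoop]
      rw [if_pos hbrk]
      have : num3 ≤ num1 - num2 := by omega
      simp [this]
    · simp only [coronaLoop]
      rw [if_neg hbrk, ih]
      have h1 : ¬ (num3 ≤ num1 - num2) := by omega
      have h2 : ¬ (num3 - (num1 - num2) ≤ num1 - num2) := by omega
      by_cases hm : m = 0
      · simp [hm, h1]
      · simp [hm, h1, h2]
        omega

-- ===== VERDICT (by name: the statement is the Claim_ definition above) =====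
theorem corona_spec : Claim_equal_corona := by
  intro num1 num2 num3 _
  unfold Spec_corona corona corona_alt
  by_cases h0 : num1 ≤ 0
  · have h00 : ((num1 + 1) - 1).toNat = 0 := by omega
    rw [h00]
    simp [coronaLoop, h0]
  · push Not at h0
    have hlen : ((((num1 + 1) - 1).toNat : Nat) : Int) = num1 := by omega
    have hne : ((num1 + 1) - 1).toNat ≠ 0 := by omega
    by_cases hres : 0 < num1 - num2
    · rw [coronaLoop_pos num1 num2 hres, hlen]
      simp only [if_neg (by omega : ¬ num1 ≤ 0), if_pos hres]
      omega
    · rw [coronaLoop_nonpos num1 num2 (by omega), if_neg hne]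
      simp only [if_neg (by omega : ¬ num1 ≤ 0), if_neg hres]
      rw [hlen]
      split_ifs with h
      · omega
      · omega
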